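-- pv_equiv track=rewrite | github.com/tanush69lucifer/Problems-of-the-week | week 5/prime_multiple_occur.py | find_prime_duplicates
-- ===== SOURCE A (Python) =====
-- def is_prime(num):
--     if num <= 1:
--         return False
--     if num == 2:
--         return True
--     if num % 2 == 0:
--         return False
--     i = 3
--     while i * i <= num:
--         if num % i == 0:
--             return False
--         i += 2
--     return True
--
-- def find_prime_duplicates(arr):
--     freq = {}
--     result = []
--     for num in arr:
--         if is_prime(num):
--             freq[num] = freq.get(num, 0) + 1
--     for num in arr:   # maintain first appearance order
--         if num in freq and freq[num] > 1 and num not in result: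
--             result.append(num)
--     return result if result else [-1]
-- ===== SOURCE B (Python) =====
-- def is_prime(num):
--     if num < 2:
--         return False
--     d = 2
--     while d * d <= num:
--         if num % d == 0:
--             return False
--         d += 1
--     return True
--
-- def find_prime_duplicates(arr):
--     # sort a copy: duplicates become adjacent, so primality is tested only on
--     # values that actually repeat; one pass over arr then emits each such prime
--     # at its first occurrence (removing it from the pending set)
--     s = sorted(arr)
--     dup_primes = {a for a, b in zip(s, s[1:]) if a == b and is_prime(a)}
--     result = []
--     for x in arr:
--         if x in dup_primes:
--             result.append(x)
--             dup_primes.discard(x)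
--     return result if result else [-1]
-- ===== Notes on version B (the rewrite author's own statement) =====
-- stated objective: alternative
-- what changed: Instead of A's frequency dict over all primes plus a second pass with a 'num not in result' scan, B sorts a copy of arr so duplicates become adjacent, runs the primality test only on values that actually repeat, and emits each such prime at its first occurrence by removing it from a pending set during one pass over arr.
import Mathlib
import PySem

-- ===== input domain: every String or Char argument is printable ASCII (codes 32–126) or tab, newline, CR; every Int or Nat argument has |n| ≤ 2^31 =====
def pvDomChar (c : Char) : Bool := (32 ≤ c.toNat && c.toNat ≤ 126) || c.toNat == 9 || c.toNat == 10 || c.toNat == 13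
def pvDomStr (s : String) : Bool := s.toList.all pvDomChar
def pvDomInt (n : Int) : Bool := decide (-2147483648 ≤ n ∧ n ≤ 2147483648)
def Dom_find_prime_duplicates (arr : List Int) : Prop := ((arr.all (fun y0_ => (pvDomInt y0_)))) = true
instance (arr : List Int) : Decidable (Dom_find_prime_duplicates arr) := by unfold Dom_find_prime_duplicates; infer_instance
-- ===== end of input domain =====

-- B replaces A's frequency dict + second pass over arr (with its 'num not in result' scan) by
-- sorting a copy so duplicates become adjacent, testing primality only on repeated values, and one
-- emit-and-discard pass over arr preserving first-appearance order; objective: alternative.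

-- ===== PORT A =====
-- A's trial-division loop 'while i*i <= num: …; i += 2' (i starts at 3, odd)
def primeLoop (num : Int) (i : Nat) : Bool :=
  if _h : (i * i : Int) ≤ num then
    if PySem.Int.mod num i = 0 then false else primeLoop num (i + 2)
  else true
termination_by num.toNat + 1 - i * i
decreasing_by
  have : (i : Int) * i ≤ num := by exact_mod_cast _h
  have h2 : i * i ≤ num.toNat := by omega
  have : i * i < (i + 2) * (i + 2) := by nlinarith
  omega

def is_prime (num : Int) : Bool :=
  if num ≤ 1 then false
  else if num = 2 then true
  else if PySem.Int.mod num 2 = 0 then false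
  else primeLoop num 3

def find_prime_duplicates (arr : List Int) : List Int :=
  let freq := arr.foldl (fun d num =>
      if is_prime num = true then d.insert num (d.getD num 0 + 1) else d)
    (PySem.Dict.empty : PySem.Dict Int Int)
  let result := arr.foldl (fun r num =>
      if freq.contains num = true ∧ freq.getD num 0 > 1 ∧ num ∉ r then r ++ [num] else r) []
  if result = [] then [-1] else result

-- ===== PORT B =====
-- B's trial-division loop 'while d*d <= num: …; d += 1' (d starts at 2, every divisor)
def primeLoopB (num : Int) (d : Nat) : Bool :=
  if _h : (d * d : Int) ≤ num then
    if PySem.Int.mod num d = 0 then false else primeLoopB num (d + 1)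
  else true
termination_by num.toNat + 1 - d * d
decreasing_by
  have : (d : Int) * d ≤ num := by exact_mod_cast _h
  have h2 : d * d ≤ num.toNat := by omega
  have : d * d < (d + 1) * (d + 1) := by nlinarith
  omega

def is_prime_b (num : Int) : Bool :=
  if num < 2 then false else primeLoopB num 2

def find_prime_duplicates_alt (arr : List Int) : List Int :=
  let s := PySem.List.sorted arr (fun x => x) false
  let dup_primes := PySem.Set.ofList
    (((s.zip (PySem.List.slice s (some 1) none)).filter
        (fun p => p.1 == p.2 && is_prime_b p.1)).map (fun p => p.1))
  let st := arr.foldl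
    (fun (st : List Int × List Int) x =>
      if PySem.Set.contains st.2 x = true then (st.1 ++ [x], PySem.Set.discard st.2 x) else st)
    ([], dup_primes)
  if st.1 = [] then [-1] else st.1

-- ===== PRECONDITION & SPEC =====
def Spec_find_prime_duplicates (arr : List Int) (out : List Int) : Prop := out = find_prime_duplicates_alt arr
instance (arr : List Int) (out : List Int) : Decidable (Spec_find_prime_duplicates arr out) := by unfold Spec_find_prime_duplicates; infer_instance

-- ===== CLAIM (what is proved, stated in full; the proofs are below) =====
def Claim_equal_find_prime_duplicates : Prop := ∀ (arr : List Int), Dom_find_prime_duplicates arr → Spec_find_prime_duplicates arr (find_prime_duplicates arr)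

-- ===== LEMMAS AND PROOFS =====

-- B's step-1 loop agrees with A's step-2 loop on odd numbers ≥ 3 from an odd start ≥ 3
theorem primeLoopB_eq_primeLoop (num : Int) (hnum : 3 ≤ num)
    (hodd : ¬ (2 : Int) ∣ num) :
    ∀ fuel d, 3 ≤ d → d % 2 = 1 → num.toNat + 1 - d * d ≤ fuel →
      primeLoopB num d = primeLoop num d := by
  intro fuel
  induction fuel with
  | zero =>
    intro d hd3 _ hf
    have hgt : ¬ ((d : Int) * d ≤ num) := by
      intro h
      have : d * d ≤ num.toNat := by omega
      omega
    rw [primeLoopB, primeLoop, dif_neg hgt, dif_neg hgt]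
  | succ n ih =>
    intro d hd3 hdodd hf
    rw [primeLoopB, primeLoop]
    by_cases hle : ((d : Int) * d ≤ num)
    · rw [dif_pos hle, dif_pos hle]
      by_cases hm : PySem.Int.mod num d = 0
      · rw [if_pos hm, if_pos hm]
      · rw [if_neg hm, if_neg hm]
        -- B visits d+1 (even, cannot divide the odd num) before reaching d+2
        have key : primeLoopB num (d + 1) = primeLoopB num (d + 2) := by
          rw [primeLoopB]
          by_cases h1 : (((d + 1 : Nat) : Int) * ((d + 1 : Nat) : Int) ≤ num)
          · rw [dif_pos h1]
            have hm1 : ¬ PySem.Int.mod num ((d + 1 : Nat) : Int) = 0 := by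
              rw [PySem.Int.mod_eq_zero_iff_dvd]
              intro hdvd
              exact hodd (dvd_trans ⟨((d + 1) / 2 : Nat), by push_cast; omega⟩ hdvd)
            rw [if_neg hm1]
          · rw [dif_neg h1, primeLoopB]
            have h2 : ¬ (((d + 2 : Nat) : Int) * ((d + 2 : Nat) : Int) ≤ num) := by
              intro h
              apply h1
              push_cast at h ⊢
              nlinarith
            rw [dif_neg h2]
        rw [key]
        apply ih (d + 2) (by omega) (by omega)
        have hdd : d * d ≤ num.toNat := by
          have h' : (d : Int) * d ≤ num := hle
          omega
        have hsq : d * d + 2 ≤ (d + 2) * (d + 2) := by nlinarith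
        omega
    · rw [dif_neg hle, dif_neg hle]

theorem is_prime_b_eq (num : Int) : is_prime_b num = is_prime num := by
  unfold is_prime_b is_prime
  by_cases hlt : num < 2
  · rw [if_pos hlt, if_pos (show num ≤ 1 by omega)]
  · rw [if_neg hlt, if_neg (show ¬ num ≤ 1 by omega)]
    by_cases h2 : num = 2
    · subst h2
      rw [if_pos rfl, primeLoopB, dif_neg (show ¬ (((2 : Nat) : Int) * ((2 : Nat) : Int) ≤ 2) by norm_num)]
    · rw [if_neg h2]
      have h3 : 3 ≤ num := by omega
      by_cases he : PySem.Int.mod num 2 = 0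
      · rw [if_pos he]
        have hdvd : (2 : Int) ∣ num := (PySem.Int.mod_eq_zero_iff_dvd num 2).mp he
        have h4 : 4 ≤ num := by rcases hdvd with ⟨k, hk⟩; omega
        rw [primeLoopB, dif_pos (show ((2 : Nat) : Int) * ((2 : Nat) : Int) ≤ num by push_cast; omega),
          if_pos (show PySem.Int.mod num ((2 : Nat) : Int) = 0 by
            rw [show ((2 : Nat) : Int) = 2 by norm_num]; exact he)]
      · rw [if_neg he]
        by_cases h4 : (((2 : Nat) : Int) * ((2 : Nat) : Int) ≤ num)
        · rw [primeLoopB, dif_pos h4,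
            if_neg (show ¬ PySem.Int.mod num ((2 : Nat) : Int) = 0 by
              rw [show ((2 : Nat) : Int) = 2 by norm_num]; exact he)]
          have hodd : ¬ (2 : Int) ∣ num := fun h =>
            he ((PySem.Int.mod_eq_zero_iff_dvd num 2).mpr h)
          exact primeLoopB_eq_primeLoop num h3 hodd (num.toNat + 1 - 9) 3 (by omega) (by omega) (by omega)
        · have hnum3 : num = 3 := by push_cast at h4; omega
          subst hnum3
          rw [primeLoopB, dif_neg h4, primeLoop,
            dif_neg (show ¬ (((3 : Nat) : Int) * ((3 : Nat) : Int) ≤ 3) by norm_num)]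

-- a fold whose step is guarded by 'if p x' is a fold over the filtered list
theorem foldl_filter_guard {α β : Type} (p : β → Bool) (f : α → β → α) :
    ∀ (l : List β) (a : α),
      l.foldl (fun acc x => if p x = true then f acc x else acc) a
        = (l.filter p).foldl f a := by
  intro l
  induction l with
  | nil => intro a; rfl
  | cons x xs ih =>
    intro a
    by_cases h : p x = true <;> simp [h, ih]

-- in a ≤-sorted list, a value has an adjacent equal neighbour iff it occurs at least twice
theorem adj_dup_iff : ∀ (s : List Int), s.Pairwise (· ≤ ·) → ∀ x : Int,
    (∃ p ∈ s.zip s.tail, p.1 = p.2 ∧ p.1 = x) ↔ 2 ≤ List.count x s := by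
  intro s
  induction s with
  | nil => intro _ x; simp
  | cons a t ih =>
    intro hs x
    rcases List.pairwise_cons.mp hs with ⟨ha, ht⟩
    cases t with
    | nil =>
      simp only [List.tail_cons, List.zip_nil_right, List.not_mem_nil, false_and, exists_false,
        false_iff, not_le, List.count_cons, List.count_nil, beq_iff_eq]
      split <;> omega
    | cons b u =>
      simp only [List.tail_cons] at ih ⊢
      rw [List.zip_cons_cons]
      constructor
      · rintro ⟨p, hp, heq, hx⟩
        rcases List.mem_cons.mp hp with h | h
        · subst h
          simp only at heq hx
          subst hx
          subst heq
          simp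
        · have h2 := (ih ht x).mp ⟨p, h, heq, hx⟩
          rw [List.count_cons]
          simp only [beq_iff_eq]
          split <;> omega
      · intro h2
        by_cases hax : a = x
        · have hxt : x ∈ b :: u := by
            by_contra hxn
            have h0 : List.count x (b :: u) = 0 := List.count_eq_zero.mpr hxn
            rw [List.count_cons, h0] at h2
            simp only [beq_iff_eq] at h2
            split at h2 <;> omega
          have hbx : b = x := by
            rcases List.mem_cons.mp hxt with h | h
            · omega
            · have hb_le : b ≤ x := (List.pairwise_cons.mp ht).1 x h
              have ha_le : a ≤ b := ha b List.mem_cons_self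
              omega
          exact ⟨(a, b), List.mem_cons_self, by simp only; omega, by simp only; omega⟩
        · have h2t : 2 ≤ List.count x (b :: u) := by
            rw [List.count_cons] at h2
            simp only [beq_iff_eq] at h2
            rw [if_neg hax] at h2
            omega
          rcases (ih ht x).mpr h2t with ⟨p, hp, h⟩
          exact ⟨p, List.mem_cons_of_mem _ hp, h⟩

-- the emit-and-discard loop over (result, pending) computes the guarded first-occurrence fold
theorem foldB_fst (P : Int → Prop) [DecidablePred P] :
    ∀ (l : List Int) (r pd : List Int),
      (∀ x : Int, x ∈ pd ↔ (P x ∧ x ∉ r)) →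
      (l.foldl (fun (st : List Int × List Int) x =>
          if PySem.Set.contains st.2 x = true then (st.1 ++ [x], PySem.Set.discard st.2 x) else st)
        (r, pd)).1
      = l.foldl (fun r x => if P x ∧ x ∉ r then r ++ [x] else r) r := by
  intro l
  induction l with
  | nil => intro r pd _; rfl
  | cons x xs ih =>
    intro r pd hinv
    simp only [List.foldl_cons]
    by_cases hc : PySem.Set.contains pd x = true
    · have hx : P x ∧ x ∉ r := (hinv x).mp (List.mem_of_elem_eq_true hc)
      rw [if_pos hc, if_pos hx]
      apply ih
      intro y
      rw [PySem.Set.mem_discard, hinv y]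
      simp only [List.mem_append, List.mem_singleton]
      tauto
    · rw [if_neg hc,
        if_neg (fun h : P x ∧ x ∉ r => hc (List.elem_eq_true_of_mem ((hinv x).mpr h)))]
      exact ih r pd hinv

-- ===== VERDICT (by name: the statement is the Claim_ definition above) =====
theorem find_prime_duplicates_spec : Claim_equal_find_prime_duplicates := by
  intro arr _
  unfold Spec_find_prime_duplicates
  simp only [find_prime_duplicates, find_prime_duplicates_alt, is_prime_b_eq]
  simp only [foldl_filter_guard (fun num => is_prime num)
    (fun (d : PySem.Dict Int Int) num => d.insert num (d.getD num 0 + 1))]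
  set P := arr.filter (fun num => is_prime num) with hP
  set freq := P.foldl (fun (d : PySem.Dict Int Int) num => d.insert num (d.getD num 0 + 1))
    PySem.Dict.empty with hfreq
  have h_keys : freq.keys = PySem.Set.ofList P := by
    rw [hfreq, PySem.Dict.keys_foldl_insert]
    simp [PySem.Set.update_nil_left]
  have h_getD : ∀ v : Int, freq.getD v 0 = (P.count v : Int) := by
    intro v
    rw [hfreq, PySem.Dict.getD_foldl_insert_add_one]
    simp
  have h_contains : ∀ v : Int, v ∈ arr → (freq.contains v = true ↔ is_prime v = true) := by
    intro v hv
    rw [PySem.Dict.contains_iff_mem_keys, h_keys, PySem.Set.mem_ofList, hP, List.mem_filter]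
    simp [hv]
  set s := PySem.List.sorted arr (fun x => x) false with hsdef
  have hsp : s.Pairwise (· ≤ ·) := by
    simpa using PySem.List.sorted_pairwise arr (fun x => x)
  have hcount : ∀ x : Int, List.count x s = List.count x arr := fun x =>
    (PySem.List.sorted_perm arr (fun x => x) false).count_eq x
  set pd0 := PySem.Set.ofList (((s.zip (PySem.List.slice s (some 1) none)).filter
      (fun p => p.1 == p.2 && is_prime p.1)).map (fun p => p.1)) with hpd
  have h_pd : ∀ x : Int, x ∈ pd0 ↔ (is_prime x = true ∧ 2 ≤ List.count x arr) := by
    intro x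
    rw [hpd, PySem.Set.mem_ofList, PySem.List.slice_from_one]
    constructor
    · intro hx
      rcases List.mem_map.mp hx with ⟨p, hpmem, hfst⟩
      rcases List.mem_filter.mp hpmem with ⟨hzip, hb⟩
      rw [Bool.and_eq_true] at hb
      rcases hb with ⟨heq, hpr⟩
      refine ⟨by rw [← hfst]; exact hpr, ?_⟩
      rw [← hcount x]
      exact (adj_dup_iff s hsp x).mp ⟨p, hzip, beq_iff_eq.mp heq, hfst⟩
    · rintro ⟨hpr, hc⟩
      rcases (adj_dup_iff s hsp x).mpr (by rw [hcount]; exact hc) with ⟨p, hpmem, heq, hfst⟩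
      exact List.mem_map.mpr ⟨p, List.mem_filter.mpr ⟨hpmem,
        by rw [Bool.and_eq_true, beq_iff_eq]; exact ⟨heq, by rw [hfst]; exact hpr⟩⟩, hfst⟩
  have hstepA : arr.foldl (fun (r : List Int) num =>
        if freq.contains num = true ∧ freq.getD num 0 > 1 ∧ num ∉ r then r ++ [num] else r) []
      = arr.foldl (fun (r : List Int) num =>
        if (is_prime num = true ∧ 2 ≤ List.count num arr) ∧ num ∉ r then r ++ [num] else r) [] := by
    apply PySem.List.foldl_congr_mem
    intro r num hmem
    by_cases hp : is_prime num = true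
    · have hc : freq.contains num = true := (h_contains num hmem).mpr hp
      have hcnt : List.count num P = List.count num arr := by
        rw [hP]; exact List.count_filter hp
      by_cases h2 : 2 ≤ List.count num arr
      · have hg : freq.getD num 0 > 1 := by
          rw [h_getD, hcnt]; exact_mod_cast h2
        by_cases hr : num ∈ r <;> simp [hc, hg, hp, h2, hr]
      · have hg : ¬ freq.getD num 0 > 1 := by
          rw [h_getD, hcnt]; intro h; exact h2 (by exact_mod_cast h)
        simp [hg, h2]
    · have hc : ¬ freq.contains num = true := fun h => hp ((h_contains num hmem).mp h)
      simp [hc, hp]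
  have hstepB := foldB_fst (fun x : Int => is_prime x = true ∧ 2 ≤ List.count x arr) arr [] pd0
    (fun x => by rw [h_pd x]; simp)
  rw [hstepA, hstepB]
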